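-- pv_equiv track=rewrite | github.com/MrDNA2018/data_structure_and_algorithm | select_max.py | partition_max
-- ===== SOURCE A (Python) =====
-- def partition_max(arr):
--
--     pointer = 0
--     max_arr =[]
--
--     while pointer <= len(arr)-2:
--         max_arr += [max(arr[pointer],arr[pointer+1])]
--         pointer +=2
--     # 假如是奇数，加上最后一个数，偶数的话加的为空
--     max_arr +=arr[pointer:]
--
--     return max_arr
--
-- arr = [4,44,5,77,8,32,18,99,377,55,33,11,12,999,678]
-- ===== SOURCE B (Python) =====
-- def partition_max(arr):
--     # Single streaming pass with a one-element "pending" buffer (state machine):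
--     # hold each element until its partner arrives, then emit the larger; an
--     # unpaired leftover is flushed at the end. No indexing, no slicing.
--     res = []
--     pending = None
--     for x in arr:
--         if pending is None:
--             pending = x
--         else:
--             res.append(pending if pending > x else x)
--             pending = None
--     if pending is not None:
--         res.append(pending)
--     return res
-- ===== Notes on version B (the rewrite author's own statement) =====
-- stated objective: alternative
-- what changed: Replaced A's index-pointer loop with random access arr[pointer], arr[pointer+1] and a final tail slice by a single streaming fold over the elements carrying a one-element pending buffer that emits the larger of each completed pair and flushes the unpaired leftover.
import Mathlib
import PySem

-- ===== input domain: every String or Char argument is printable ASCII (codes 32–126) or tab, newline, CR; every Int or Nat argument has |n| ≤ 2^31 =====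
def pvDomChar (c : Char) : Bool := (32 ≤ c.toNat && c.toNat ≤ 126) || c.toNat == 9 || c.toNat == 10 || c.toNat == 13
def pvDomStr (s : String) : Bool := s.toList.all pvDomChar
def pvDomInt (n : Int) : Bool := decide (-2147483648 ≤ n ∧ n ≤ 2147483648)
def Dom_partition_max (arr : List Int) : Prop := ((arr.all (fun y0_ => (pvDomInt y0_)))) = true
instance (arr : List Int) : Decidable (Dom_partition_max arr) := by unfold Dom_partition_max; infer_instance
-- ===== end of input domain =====

-- B replaces A's index-pointer loop (random access arr[p], arr[p+1] plus a final tail slice)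
-- by a single streaming fold with a one-element pending buffer; objective: alternative.

-- ===== PORT A =====
-- the while loop of A: pointer advances by 2, max_arr accumulates; afterwards max_arr += arr[pointer:]
def pmGo (arr : List Int) (pointer : Int) (max_arr : List Int) : List Int :=
  if _h : pointer ≤ (arr.length : Int) - 2 then
    pmGo arr (pointer + 2)
      (max_arr ++ [max ((PySem.List.pyGet? arr pointer).getD 0) ((PySem.List.pyGet? arr (pointer + 1)).getD 0)])
      -- pyGet? is in range here (0 ≤ pointer ≤ len-2), so getD 0 is exact
  else
    max_arr ++ PySem.List.slice arr (some pointer) none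
termination_by ((arr.length : Int) + 2 - pointer).toNat
decreasing_by omega

def partition_max (arr : List Int) : List Int := pmGo arr 0 []

-- ===== PORT B =====
-- one fold step of Source B's loop: state = (res, pending)
def pmStep (st : List Int × Option Int) (x : Int) : List Int × Option Int :=
  match st.2 with
  | none => (st.1, some x)
  | some p => (st.1 ++ [if p > x then p else x], none)

def partition_max_alt (arr : List Int) : List Int :=
  let st := arr.foldl pmStep ([], none)
  match st.2 with
  | none => st.1
  | some p => st.1 ++ [p]

-- ===== PRECONDITION & SPEC =====
def Spec_partition_max (arr : List Int) (out : List Int) : Prop := out = partition_max_alt arr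
instance (arr : List Int) (out : List Int) : Decidable (Spec_partition_max arr out) := by unfold Spec_partition_max; infer_instance

-- ===== CLAIM =====
def Claim_equal_partition_max : Prop := ∀ (arr : List Int), Dom_partition_max arr → Spec_partition_max arr (partition_max arr)

-- ===== LEMMAS AND PROOFS =====

-- the pairwise-max function both ports compute (proof-only helper)
def pvPairs : List Int → List Int
  | a :: b :: t => max a b :: pvPairs t
  | l => l

theorem pvPairs_short (arr : List Int) (h : arr.length ≤ 1) : pvPairs arr = arr := by
  match arr with
  | [] => rfl
  | [a] => rfl
  | a :: b :: t => simp at h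

theorem pmGo_eq (arr : List Int) (n : Nat) (acc : List Int) :
    pmGo arr (n : Int) acc = acc ++ pvPairs (arr.drop n) := by
  rw [pmGo]
  by_cases h : (n : Int) ≤ (arr.length : Int) - 2
  · have hn2 : n + 2 ≤ arr.length := by exact_mod_cast by omega
    rw [dif_pos h]
    have h1 : n < arr.length := by omega
    have h2 : n + 1 < arr.length := by omega
    have hc1 : ((n : Int) + 1) = ((n + 1 : Nat) : Int) := by push_cast; ring
    have hc2 : ((n : Int) + 2) = ((n + 2 : Nat) : Int) := by push_cast; ring
    rw [hc1, hc2, pmGo_eq arr (n + 2)]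
    have hg1 : (PySem.List.pyGet? arr (n : Int)).getD 0 = arr[n] := by
      rw [PySem.List.pyGet?_natCast]; simp [h1]
    have hg2 : (PySem.List.pyGet? arr ((n : Int) + 1)).getD 0 = arr[n + 1] := by
      rw [hc1, PySem.List.pyGet?_natCast]; simp [h2]
    have hd : arr.drop n = arr[n] :: arr[n+1] :: arr.drop (n + 2) := by
      rw [List.drop_eq_getElem_cons h1, List.drop_eq_getElem_cons h2]
    rw [hd]
    simp [pvPairs, hg2, h1]
  · rw [dif_neg h]
    have hlen : arr.length ≤ n + 1 := by omega
    rw [PySem.List.slice_from_natCast, pvPairs_short]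
    simp; omega
termination_by arr.length - n
decreasing_by omega

-- the fold of B, started with empty pending, computes res ++ pvPairs arr after the flush
theorem pmFold_eq (arr : List Int) (res : List Int) :
    (match (arr.foldl pmStep (res, none)).2 with
     | none => (arr.foldl pmStep (res, none)).1
     | some p => (arr.foldl pmStep (res, none)).1 ++ [p]) = res ++ pvPairs arr := by
  match arr with
  | [] => simp [List.foldl, pvPairs]
  | [a] => simp [List.foldl, pmStep, pvPairs]
  | a :: b :: t =>
    have hm : (if a > b then a else b) = max a b := by
      rw [max_def]; split_ifs <;> omega
    have hstep : (a :: b :: t).foldl pmStep (res, none)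
        = t.foldl pmStep (res ++ [max a b], none) := by
      simp [pmStep, hm]
    rw [hstep, pmFold_eq t (res ++ [max a b])]
    simp [pvPairs]
termination_by arr.length

-- ===== VERDICT =====
theorem partition_max_spec : Claim_equal_partition_max := by
  intro arr _
  unfold Spec_partition_max partition_max partition_max_alt
  have h0 : pmGo arr 0 [] = pvPairs arr := by simpa using pmGo_eq arr 0 []
  rw [h0]
  simpa using (pmFold_eq arr []).symm
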